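-- pv_equiv track=rewrite | github.com/youjewon/AlgorithmStudy | 프로그래머스/1/133502. 햄버거 만들기/햄버거 만들기.py | solution
-- ===== SOURCE A (Python) =====
-- def solution(ingredient):
--     stack = []
--     answer = 0
--
--     for x in ingredient:
--         stack.append(x)
--
--         if len(stack) >= 4 and stack[-4:] == [1,2,3,1]:
--             stack.pop()
--             stack.pop()
--             stack.pop()
--             stack.pop()
--             answer+= 1
--
--     return answer
-- ===== SOURCE B (Python) =====
-- def solution(ingredient):
--     # Rewrite view: repeatedly find the leftmost occurrence of [1,2,3,1]
--     # and delete it, counting deletions, until no occurrence remains.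
--     s = list(ingredient)
--     answer = 0
--     while True:
--         i = -1
--         for j in range(len(s) - 3):
--             if s[j:j+4] == [1, 2, 3, 1]:
--                 i = j
--                 break
--         if i == -1:
--             return answer
--         s = s[:i] + s[i+4:]
--         answer += 1
-- ===== Notes on version B (the rewrite author's own statement) =====
-- stated objective: alternative
-- what changed: Replaces the single-pass incremental stack (push each ingredient, pop when the top four form [1,2,3,1]) with a global rewrite loop that repeatedly searches the whole list for the leftmost [1,2,3,1] occurrence, deletes it and counts, until no occurrence remains.
import Mathlib
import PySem

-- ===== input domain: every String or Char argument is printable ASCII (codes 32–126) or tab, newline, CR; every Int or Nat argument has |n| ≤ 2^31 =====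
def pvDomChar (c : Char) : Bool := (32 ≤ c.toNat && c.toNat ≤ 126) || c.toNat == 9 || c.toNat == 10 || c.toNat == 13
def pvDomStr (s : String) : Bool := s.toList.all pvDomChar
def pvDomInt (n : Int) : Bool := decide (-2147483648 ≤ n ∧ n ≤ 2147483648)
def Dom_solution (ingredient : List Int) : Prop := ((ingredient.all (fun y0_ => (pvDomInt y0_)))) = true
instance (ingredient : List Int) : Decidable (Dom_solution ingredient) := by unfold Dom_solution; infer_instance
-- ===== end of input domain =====

-- B replaces A's incremental stack with a global rewrite loop (find the leftmost [1,2,3,1], delete it, repeat); alternative decomposition, not faster.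

-- ===== PORT A =====
-- loop state = (stack, answer); one fold step per iteration, in source order
def stepA (st : List Int × Int) (x : Int) : List Int × Int :=
  let stack := st.1 ++ [x]  -- stack.append(x)
  if stack.length ≥ 4 ∧ PySem.List.slice stack (some (-4)) none = [1, 2, 3, 1] then
    -- four stack.pop() calls (last element removed, value discarded)
    (stack.dropLast.dropLast.dropLast.dropLast, st.2 + 1)
  else (stack, st.2)

def solution (ingredient : List Int) : Int :=
  (ingredient.foldl stepA ([], 0)).2

-- ===== PORT B =====
-- the inner scan `for j in range(len(s)-3): if s[j:j+4]==[1,2,3,1]: i=j; break` (else i=-1),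
-- as the obvious structural recursion over s (exact: first index of the pattern, else -1)
def findPat : List Int → Int
  | 1 :: 2 :: 3 :: 1 :: _ => 0
  | _ :: rest => if findPat rest = -1 then -1 else findPat rest + 1
  | [] => -1

theorem findPat_cons_ne (x : Int) (rest : List Int) (h : ∀ t, x :: rest ≠ 1 :: 2 :: 3 :: 1 :: t) :
    findPat (x :: rest) = if findPat rest = -1 then -1 else findPat rest + 1 := by
  rw [findPat.eq_def]
  split
  · rename_i t heq
    exact absurd heq (h t)
  · rename_i y ys heq
    obtain ⟨rfl, rfl⟩ := List.cons.inj heq.symm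
    rfl
  · rename_i heq
    simp at heq

theorem findPat_nonneg (s : List Int) : findPat s = -1 ∨ 0 ≤ findPat s := by
  induction s with
  | nil => left; rfl
  | cons x rest ih =>
    by_cases hp : ∃ t, x :: rest = 1 :: 2 :: 3 :: 1 :: t
    · obtain ⟨t, ht⟩ := hp
      rw [ht]
      right
      simp [findPat]
    · rw [findPat_cons_ne x rest (fun t hteq => hp ⟨t, hteq⟩)]
      rcases ih with h | h
      · simp [h]
      · rw [if_neg (by omega)]
        right; omega

theorem findPat_le (s : List Int) (h : findPat s ≠ -1) :
    (findPat s).toNat + 4 ≤ s.length := by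
  induction s with
  | nil => simp [findPat] at h
  | cons x rest ih =>
    by_cases hp : ∃ t, x :: rest = 1 :: 2 :: 3 :: 1 :: t
    · obtain ⟨t, ht⟩ := hp
      rw [ht]
      simp [findPat]
    · rw [findPat_cons_ne x rest (fun t hteq => hp ⟨t, hteq⟩)] at h ⊢
      by_cases hr : findPat rest = -1
      · simp [hr] at h
      · rw [if_neg hr] at h ⊢
        have h1 := ih hr
        have h2 := findPat_nonneg rest
        simp only [List.length_cons]
        omega

-- termination measure for loopB's while loop (cited by name in decreasing_by)
theorem loopB_dec (s : List Int) (h : ¬ findPat s = -1) :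
    (s.take (findPat s).toNat ++ s.drop ((findPat s).toNat + 4)).length < s.length := by
  have h4 := findPat_le s h
  simp only [List.length_append, List.length_take, List.length_drop]
  omega

-- while-loop of B as tail recursion on (s, answer)
def loopB (s : List Int) (answer : Int) : Int :=
  if h : findPat s = -1 then answer
  else
    -- s = s[:i] + s[i+4:]; findPat s ≥ 0 here (findPat_nonneg), so take/drop is exact
    loopB (s.take (findPat s).toNat ++ s.drop ((findPat s).toNat + 4)) (answer + 1)
termination_by s.length
decreasing_by exact loopB_dec s h

def solution_alt (ingredient : List Int) : Int :=
  loopB ingredient 0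

-- ===== PRECONDITION & SPEC =====
def Spec_solution (ingredient : List Int) (out : Int) : Prop := out = solution_alt ingredient
instance (ingredient : List Int) (out : Int) : Decidable (Spec_solution ingredient out) := by unfold Spec_solution; infer_instance

-- ===== CLAIM (what is proved, stated in full; the proofs are below) =====
def Claim_equal_solution : Prop := ∀ (ingredient : List Int), Dom_solution ingredient → Spec_solution ingredient (solution ingredient)

-- ===== LEMMAS AND PROOFS =====

-- reversed-stack model of A's loop (top of the stack at the head)
def run : List Int → List Int → Int → List Int × Int
  | [], st, c => (st, c)
  | x :: xs, st, c =>
    match st with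
    | 3 :: 2 :: 1 :: r => if x = 1 then run xs r (c + 1) else run xs (x :: st) c
    | _ => run xs (x :: st) c

theorem run_cons_pop (xs r : List Int) (c : Int) :
    run (1 :: xs) (3 :: 2 :: 1 :: r) c = run xs r (c + 1) := by
  simp [run]

theorem run_cons_push (x : Int) (xs st : List Int) (c : Int)
    (h : ∀ r, ¬(st = 3 :: 2 :: 1 :: r ∧ x = 1)) :
    run (x :: xs) st c = run xs (x :: st) c := by
  simp only [run]
  split
  · rename_i r
    rw [if_neg (fun hx => h r ⟨rfl, hx⟩)]
  · rfl

theorem run_append (a b : List Int) (st : List Int) (c : Int) :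
    run (a ++ b) st c = run b (run a st c).1 (run a st c).2 := by
  induction a generalizing st c with
  | nil => simp [run]
  | cons x xs ih =>
    simp only [List.cons_append, run]
    split
    · split
      · exact ih _ _
      · exact ih _ _
    · exact ih _ _

theorem run_shift (a : List Int) (st : List Int) (c d : Int) :
    run a st (c + d) = ((run a st c).1, (run a st c).2 + d) := by
  induction a generalizing st c with
  | nil => simp [run]
  | cons x xs ih =>
    simp only [run]
    split
    · split
      · have hcd : c + d + 1 = (c + 1) + d := by ring
        rw [hcd, ih]
      · exact ih _ _
    · exact ih _ _

-- occurrence of the pattern at index j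
def occAt (s : List Int) (j : Nat) : Prop := [1, 2, 3, 1] <+: s.drop j

theorem findPat_neg1 (s : List Int) (h : findPat s = -1) (j : Nat) : ¬ occAt s j := by
  induction s generalizing j with
  | nil => simp [occAt]
  | cons x rest ih =>
    by_cases hp : ∃ t, x :: rest = 1 :: 2 :: 3 :: 1 :: t
    · obtain ⟨t, ht⟩ := hp
      rw [ht] at h
      simp [findPat] at h
    · rw [findPat_cons_ne x rest (fun t hteq => hp ⟨t, hteq⟩)] at h
      by_cases hr : findPat rest = -1
      · cases j with
        | zero =>
          intro hocc
          obtain ⟨t, ht⟩ := hocc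
          simp only [List.drop_zero] at ht
          exact hp ⟨t, ht.symm⟩
        | succ j =>
          intro hocc
          exact ih hr j (by simpa [occAt] using hocc)
      · rw [if_neg hr] at h
        have := findPat_nonneg rest
        omega

theorem findPat_found (s : List Int) (h : findPat s ≠ -1) :
    occAt s (findPat s).toNat ∧ ∀ j < (findPat s).toNat, ¬ occAt s j := by
  induction s with
  | nil => simp [findPat] at h
  | cons x rest ih =>
    by_cases hp : ∃ t, x :: rest = 1 :: 2 :: 3 :: 1 :: t
    · obtain ⟨t, ht⟩ := hp
      rw [ht]
      constructor
      · simp [findPat, occAt]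
      · simp [findPat]
    · rw [findPat_cons_ne x rest (fun t hteq => hp ⟨t, hteq⟩)] at h ⊢
      by_cases hr : findPat rest = -1
      · simp [hr] at h
      · rw [if_neg hr] at h ⊢
        obtain ⟨ho, hmin⟩ := ih hr
        have hk : (findPat rest + 1).toNat = (findPat rest).toNat + 1 := by
          have := findPat_nonneg rest
          omega
        rw [hk]
        constructor
        · simpa [occAt] using ho
        · intro j hj
          cases j with
          | zero =>
            intro hocc
            obtain ⟨t, ht⟩ := hocc
            simp only [List.drop_zero] at ht
            exact hp ⟨t, ht.symm⟩
          | succ j =>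
            intro hocc
            exact hmin j (by omega) (by simpa [occAt] using hocc)

theorem reverse_eq_321 (a r : List Int) (h : a.reverse = 3 :: 2 :: 1 :: r) :
    a = r.reverse ++ [1, 2, 3] := by
  have := congrArg List.reverse h
  simpa using this

-- if s has no occurrence, the run from the empty stack never pops
theorem run_noOcc (s : List Int) (hno : ∀ j, ¬ occAt s j) (c : Int) :
    run s [] c = (s.reverse, c) := by
  induction s using List.reverseRecOn with
  | nil => simp [run]
  | append_singleton a x ih =>
    have hna : ∀ j, ¬ occAt a j := by
      intro j hj
      apply hno j
      have hlen : j ≤ a.length := by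
        have h4 := hj.length_le
        by_contra hgt
        rw [List.drop_eq_nil_of_le (by omega)] at h4
        simp at h4
      unfold occAt
      rw [List.drop_append_of_le_length hlen]
      exact hj.trans (List.prefix_append _ _)
    rw [run_append, ih hna]
    by_cases hc : ∃ r, a.reverse = 3 :: 2 :: 1 :: r ∧ x = 1
    · exfalso
      obtain ⟨r, hr, hx⟩ := hc
      have ha := reverse_eq_321 a r hr
      apply hno r.length
      have hd : (a ++ [x]).drop r.length = [1, 2, 3, 1] := by
        subst hx
        rw [ha, List.append_assoc]
        simp
      unfold occAt
      rw [hd]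
    · rw [run_cons_push x [] a.reverse c (fun r hr => hc ⟨r, hr⟩)]
      simp [run]

-- key lemma: deleting the LEFTMOST occurrence decrements the run count by one
theorem run_delete (s : List Int) (h : findPat s ≠ -1) :
    (run s [] 0).2 =
      (run ((s.take (findPat s).toNat) ++ s.drop ((findPat s).toNat + 4)) [] 0).2 + 1 := by
  obtain ⟨hocc, hmin⟩ := findPat_found s h
  set i := (findPat s).toNat with hi
  obtain ⟨v, hv⟩ := hocc
  have hs : s = s.take i ++ ([1, 2, 3, 1] ++ v) := by
    rw [hv, List.take_append_drop]
  have hvdrop : s.drop (i + 4) = v := by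
    rw [← List.drop_drop, ← hv]
    rfl
  have hile : i + 4 ≤ s.length := by
    have := findPat_le s h
    omega
  have hulen : (s.take i).length = i := by
    simp
    omega
  have hu : ∀ j, ¬ occAt (s.take i) j := by
    intro j hj
    have h4 : j + 4 ≤ i := by
      have hl := hj.length_le
      simp at hl
      omega
    apply hmin j (by omega)
    unfold occAt at hj ⊢
    rw [List.drop_take] at hj
    exact hj.trans (List.take_prefix _ _)
  -- (s.take i) does not end with [1,2,3] (else an earlier occurrence exists)
  have hnotail : ∀ r, (s.take i).reverse ≠ 3 :: 2 :: 1 :: r := by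
    intro r hrev
    have hue := reverse_eq_321 _ r hrev
    have hri : r.length + 3 = i := by
      have := congrArg List.length hue
      simp at this
      omega
    apply hmin r.length (by omega)
    unfold occAt
    have hds : s.drop r.length = [1, 2, 3] ++ ([1, 2, 3, 1] ++ v) := by
      conv_lhs => rw [hs, hue]
      rw [List.append_assoc]
      simp
    rw [hds]
    exact ⟨[2, 3, 1] ++ v, rfl⟩
  have hL : run s [] 0 = run v (s.take i).reverse 1 := by
    conv_lhs => rw [hs]
    rw [run_append, run_noOcc _ hu]
    show run (1 :: 2 :: 3 :: 1 :: v) (s.take i).reverse 0 = _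
    rw [run_cons_push 1 _ _ 0 (fun r hr => hnotail r hr.1)]
    rw [run_cons_push 2 _ _ 0 (by intro r hr; exact absurd hr.2 (by norm_num))]
    rw [run_cons_push 3 _ _ 0 (by intro r hr; exact absurd hr.2 (by norm_num))]
    rw [run_cons_pop]
    norm_num
  have hR : run (s.take i ++ s.drop (i + 4)) [] 0 = run v (s.take i).reverse 0 := by
    rw [hvdrop, run_append, run_noOcc _ hu]
  rw [hL, hR]
  have hsh : (run v (s.take i).reverse 1).2 = (run v (s.take i).reverse 0).2 + 1 := by
    rw [show (1 : Int) = 0 + 1 by norm_num, run_shift]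
    simp
  rw [hsh]

theorem loopB_run (s : List Int) (ans : Int) : loopB s ans = (run s [] 0).2 + ans := by
  induction s, ans using loopB.induct with
  | case1 s ans h =>
    rw [loopB, dif_pos h]
    rw [run_noOcc s (findPat_neg1 s h) 0]
    simp
  | case2 s ans h ih =>
    rw [loopB, dif_neg h, ih]
    have := run_delete s h
    omega

theorem stepA_run (s : List Int) (T : List Int) (c : Int) :
    List.foldl stepA (T.reverse, c) s = ((run s T c).1.reverse, (run s T c).2) := by
  induction s generalizing T c with
  | nil => simp [run]
  | cons x xs ih =>
    rw [List.foldl_cons]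
    by_cases hc : ∃ r, T = 3 :: 2 :: 1 :: r ∧ x = 1
    · obtain ⟨r, hT, hx⟩ := hc
      subst hT hx
      have hstack : (3 :: 2 :: 1 :: r : List Int).reverse ++ [1] = r.reverse ++ [1, 2, 3, 1] := by
        simp
      have hcond : (r.reverse ++ [1, 2, 3, 1] : List Int).length ≥ 4 ∧
          PySem.List.slice (r.reverse ++ [1, 2, 3, 1] : List Int) (some (-4)) none = [1, 2, 3, 1] := by
        constructor
        · simp
        · rw [PySem.List.slice_from_neg_ofNat _ 4 (by omega)]
          have hlen : (r.reverse ++ [1, 2, 3, 1] : List Int).length - 4 = r.reverse.length := by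
            simp
          rw [hlen, List.drop_left]
      have hstep : stepA ((3 :: 2 :: 1 :: r : List Int).reverse, c) 1 = (r.reverse, c + 1) := by
        unfold stepA
        rw [show ((3 :: 2 :: 1 :: r : List Int).reverse, c).1 ++ [1] = r.reverse ++ [1, 2, 3, 1] from hstack]
        rw [if_pos hcond]
        simp
      rw [hstep, run_cons_pop, ih]
    · have hpush : stepA (T.reverse, c) x = ((x :: T).reverse, c) := by
        unfold stepA
        rw [if_neg]
        · simp
        · rintro ⟨hlen, hsl⟩
          rw [PySem.List.slice_from_neg_ofNat _ 4 (by norm_num)] at hsl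
          have hdec : (T.reverse, c).1 ++ [x] =
              ((T.reverse, c).1 ++ [x]).take (((T.reverse, c).1 ++ [x]).length - 4) ++ [1, 2, 3, 1] := by
            conv_lhs => rw [← List.take_append_drop (((T.reverse, c).1 ++ [x]).length - 4) ((T.reverse, c).1 ++ [x])]
            rw [hsl]
          have hrevd := congrArg List.reverse hdec
          simp only [List.reverse_append, List.reverse_cons, List.reverse_nil] at hrevd
          simp at hrevd
          obtain ⟨hx1, hT1⟩ := hrevd
          exact hc ⟨_, hT1, hx1⟩
      rw [hpush, run_cons_push x xs T c (fun r hr => hc ⟨r, hr⟩), ih]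

-- ===== VERDICT (by name: the statement is the Claim_ definition above) =====
theorem solution_spec : Claim_equal_solution := by
  intro ingredient _
  unfold Spec_solution solution solution_alt
  have h := stepA_run ingredient [] 0
  simp only [List.reverse_nil] at h
  rw [h, loopB_run]
  simp
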